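-- pv_equiv track=rewrite | github.com/mariecordes/gridgpt | src/gridgpt/word_database.py | create_word_database_by_length
-- ===== SOURCE A (Python) =====
-- from typing import Dict, List
--
-- def create_word_database_by_length(words: Dict[str, int]) -> Dict[int, List[str]]:
--     """Organize words by length for faster crossword generation."""
--     words_by_length = {}
--
--     for word, freq in words.items():
--         length = len(word)
--         if length not in words_by_length:
--             words_by_length[length] = []
--         words_by_length[length].append(word)
--
--     # Sort each length group by frequency (highest first)
--     for length in words_by_length:
--         words_by_length[length].sort(key=lambda w: words[w], reverse=True)
--
--     return words_by_length
-- ===== SOURCE B (Python) =====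
-- def create_word_database_by_length(words):
--     """Organize words by length."""
--     words_by_length = {len(word): [] for word in words}
--     for word, _freq in sorted(words.items(), key=lambda kv: kv[1], reverse=True):
--         words_by_length[len(word)].append(word)
--     return words_by_length
-- ===== Notes on version B (the rewrite author's own statement) =====
-- stated objective: alternative
-- what changed: Instead of grouping words into length buckets and then sorting each bucket with a per-word dict lookup key, B pre-creates the length-keyed buckets in first-occurrence order, does ONE global stable sort of all (word, freq) pairs by frequency descending, and appends each word to its bucket in that order; stability makes every bucket identical to A's per-bucket sort. Pre_ only requires distinct word keys, which every Python dict argument has by construction.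
import Mathlib
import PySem

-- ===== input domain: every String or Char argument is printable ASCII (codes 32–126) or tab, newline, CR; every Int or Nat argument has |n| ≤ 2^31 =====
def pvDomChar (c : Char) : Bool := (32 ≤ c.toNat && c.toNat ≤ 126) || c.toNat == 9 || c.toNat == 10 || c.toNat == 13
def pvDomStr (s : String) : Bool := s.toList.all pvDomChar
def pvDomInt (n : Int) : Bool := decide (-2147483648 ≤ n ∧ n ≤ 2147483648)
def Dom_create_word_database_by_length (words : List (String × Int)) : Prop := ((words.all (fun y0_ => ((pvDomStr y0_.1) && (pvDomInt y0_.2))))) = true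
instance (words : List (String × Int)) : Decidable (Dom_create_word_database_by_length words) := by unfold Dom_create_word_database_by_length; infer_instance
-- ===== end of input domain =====

-- B replaces A's group-then-sort-each-bucket with prime-the-buckets + ONE global stable sort
-- by frequency descending + a single distribution pass (alternative decomposition, same cost).

-- ===== PORT A =====
def create_word_database_by_length (words : List (String × Int)) : List (Int × List String) :=
  -- for word, freq in words.items(): group by len(word)
  let words_by_length : PySem.Dict Int (List String) :=
    words.foldl (fun d p =>
      let length : Int := PySem.Str.len p.1
      let d := if d.contains length then d else d.insert length []
      d.modify length [] (fun l => l ++ [p.1])) PySem.Dict.empty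
  -- for length in words_by_length: words_by_length[length].sort(key=lambda w: words[w], reverse=True)
  words_by_length.items.map (fun q =>
    (q.1, PySem.List.sorted q.2 (fun w => (PySem.Dict.mk words).getD w 0) true))

-- ===== PORT B =====
def create_word_database_by_length_alt (words : List (String × Int)) : List (Int × List String) :=
  -- words_by_length = {len(word): [] for word in words}
  let base : PySem.Dict Int (List String) :=
    words.foldl (fun d p => d.insert (PySem.Str.len p.1) []) PySem.Dict.empty
  -- for word, _freq in sorted(words.items(), key=lambda kv: kv[1], reverse=True): append
  let srt := PySem.List.sorted words (fun kv => kv.2) true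
  (srt.foldl (fun d p => d.modify (PySem.Str.len p.1) [] (fun l => l ++ [p.1])) base).items

-- ===== PRECONDITION & SPEC =====
-- The Python argument is a dict, whose keys are unique by construction; Pre_ excludes only
-- association lists with duplicate word keys, which no Python dict input can produce.
def Pre_create_word_database_by_length (words : List (String × Int)) : Prop :=
  (words.map (·.1)).Nodup
instance (words : List (String × Int)) : Decidable (Pre_create_word_database_by_length words) := by unfold Pre_create_word_database_by_length; infer_instance

def pvWitness_create_word_database_by_length : (List (String × Int)) := [("word", 5), ("at", 3), ("it", 7), ("a", 1)]

def Spec_create_word_database_by_length (words : List (String × Int)) (out : List (Int × List String)) : Prop := out = create_word_database_by_length_alt words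
instance (words : List (String × Int)) (out : List (Int × List String)) : Decidable (Spec_create_word_database_by_length words out) := by unfold Spec_create_word_database_by_length; infer_instance

-- ===== CLAIM (what is proved, stated in full; the proofs are below) =====
def Claim_equal_create_word_database_by_length : Prop := ∀ (words : List (String × Int)), Dom_create_word_database_by_length words → Pre_create_word_database_by_length words → Spec_create_word_database_by_length words (create_word_database_by_length words)

-- ===== LEMMAS AND PROOFS =====

-- generic comparator-level lemmas
theorem pvInsertBy_head {α : Type} (b : α → α → Bool) (x : α) (l : List α)
    (h : ∀ z ∈ l, b x z = true) : PySem.List.insertBy b x l = x :: l := by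
  cases l with
  | nil => rfl
  | cons y ys => simp [PySem.List.insertBy, h y (by simp)]

theorem pvMap_insertBy {α β : Type} (b : α → α → Bool) (b' : β → β → Bool) (f : α → β)
    (x : α) (l : List α) (h : ∀ y ∈ l, b' (f x) (f y) = b x y) :
    PySem.List.insertBy b' (f x) (l.map f) = (PySem.List.insertBy b x l).map f := by
  induction l with
  | nil => rfl
  | cons y ys ih =>
    simp only [List.map_cons, PySem.List.insertBy, h y (by simp)]
    by_cases hb : b x y
    · simp [hb]
    · simp [hb, ih (fun z hz => h z (by simp [hz]))]

theorem pvInsertBy_cons_pos {α : Type} (b : α → α → Bool) (x y : α) (ys : List α)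
    (h : b x y = true) : PySem.List.insertBy b x (y :: ys) = x :: y :: ys := by
  simp [PySem.List.insertBy, h]

theorem pvInsertBy_cons_neg {α : Type} (b : α → α → Bool) (x y : α) (ys : List α)
    (h : b x y = false) : PySem.List.insertBy b x (y :: ys) = y :: PySem.List.insertBy b x ys := by
  simp [PySem.List.insertBy, h]

-- pairwise preservation for the reverse-by-snd comparator
theorem pvInsertBy_pairwise (x : String × Int) (l : List (String × Int))
    (h : l.Pairwise (fun a c => c.2 ≤ a.2)) :
    (PySem.List.insertBy (fun a b => decide (b.2 < a.2)) x l).Pairwise (fun a c => c.2 ≤ a.2) := by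
  induction l with
  | nil => simp [PySem.List.insertBy]
  | cons y ys ih =>
    rw [List.pairwise_cons] at h
    obtain ⟨hy, hys⟩ := h
    by_cases hb : y.2 < x.2
    · rw [pvInsertBy_cons_pos _ _ _ _ (by simp [hb])]
      refine List.pairwise_cons.2 ⟨?_, List.pairwise_cons.2 ⟨hy, hys⟩⟩
      intro z hz
      rcases List.mem_cons.1 hz with rfl | hz
      · omega
      · have := hy z hz; omega
    · rw [pvInsertBy_cons_neg _ _ _ _ (by simp [hb])]
      refine List.pairwise_cons.2 ⟨?_, ih hys⟩
      intro z hz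
      rcases (PySem.List.mem_insertBy _ _ _ _).1 hz with rfl | hz
      · omega
      · exact hy z hz

theorem pvFilter_insertBy (p : String × Int → Bool) (x : String × Int) (l : List (String × Int))
    (h : l.Pairwise (fun a c => c.2 ≤ a.2)) :
    (PySem.List.insertBy (fun a b => decide (b.2 < a.2)) x l).filter p =
      if p x then PySem.List.insertBy (fun a b => decide (b.2 < a.2)) x (l.filter p) else l.filter p := by
  induction l with
  | nil => by_cases hp : p x <;> simp [PySem.List.insertBy, hp]
  | cons y ys ih =>
    rw [List.pairwise_cons] at h
    obtain ⟨hy, hys⟩ := h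
    by_cases hb : y.2 < x.2
    · rw [pvInsertBy_cons_pos _ _ _ _ (by simp [hb])]
      by_cases hp : p x
      · rw [if_pos hp]
        have hall : ∀ z ∈ (y :: ys).filter p, (decide (z.2 < x.2)) = true := by
          intro z hz
          have hz' := List.mem_of_mem_filter hz
          rcases List.mem_cons.1 hz' with rfl | hz''
          · simp [hb]
          · have := hy z hz''; simp; omega
        rw [pvInsertBy_head _ x ((y :: ys).filter p) hall]
        simp [List.filter_cons, hp]
      · rw [if_neg hp]
        simp [List.filter_cons, hp]
    · rw [pvInsertBy_cons_neg _ _ _ _ (by simp [hb])]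
      have hrw : ∀ l, PySem.List.insertBy (fun a b => decide (b.2 < a.2)) x (y :: l) =
          y :: PySem.List.insertBy (fun a b => decide (b.2 < a.2)) x l :=
        fun l => pvInsertBy_cons_neg _ x y l (by simp [hb])
      by_cases hpy : p y <;> by_cases hp : p x <;>
        simp [hpy, hp, ih hys, hrw]

-- stable reverse sort by snd commutes with filter
theorem pvFoldl_insertBy_filter (p : String × Int → Bool) (xs acc : List (String × Int))
    (h : acc.Pairwise (fun a c => c.2 ≤ a.2)) :
    (xs.foldl (fun a x => PySem.List.insertBy (fun a b => decide (b.2 < a.2)) x a) acc).filter p =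
      (xs.filter p).foldl (fun a x => PySem.List.insertBy (fun a b => decide (b.2 < a.2)) x a) (acc.filter p) := by
  induction xs generalizing acc with
  | nil => simp
  | cons x xs ih =>
    simp only [List.foldl_cons, List.filter_cons]
    rw [ih _ (pvInsertBy_pairwise x acc h), pvFilter_insertBy p x acc h]
    by_cases hp : p x <;> simp [hp]

theorem pvFilter_sorted (p : String × Int → Bool) (xs : List (String × Int)) :
    (PySem.List.sorted xs (fun kv => kv.2) true).filter p =
      PySem.List.sorted (xs.filter p) (fun kv => kv.2) true := by
  rw [PySem.List.sorted_rev_eq_foldl_insertBy, PySem.List.sorted_rev_eq_foldl_insertBy]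
  simpa using pvFoldl_insertBy_filter p xs [] (by simp)

-- sorting the words by a lookup key that agrees with snd = mapping fst over the pair sort
theorem pvFoldl_insertBy_map (k : String → Int) (xs acc : List (String × Int))
    (hxs : ∀ q ∈ xs, k q.1 = q.2) (hacc : ∀ q ∈ acc, k q.1 = q.2) :
    (xs.map (·.1)).foldl (fun a w => PySem.List.insertBy (fun a b => decide (k b < k a)) w a) (acc.map (·.1)) =
      (xs.foldl (fun a x => PySem.List.insertBy (fun a b => decide (b.2 < a.2)) x a) acc).map (·.1) := by
  induction xs generalizing acc with
  | nil => simp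
  | cons x xs ih =>
    simp only [List.map_cons, List.foldl_cons]
    rw [pvMap_insertBy (fun a b => decide (b.2 < a.2)) (fun a b => decide (k b < k a)) (·.1) x acc
        (fun y hy => by simp [hxs x (by simp), hacc y hy])]
    exact ih _ (fun q hq => hxs q (by simp [hq]))
      (fun q hq => by
        rcases (PySem.List.mem_insertBy _ _ _ _).1 hq with rfl | hq
        · exact hxs q (by simp)
        · exact hacc q hq)

theorem pvSorted_map_key (k : String → Int) (xs : List (String × Int))
    (hxs : ∀ q ∈ xs, k q.1 = q.2) :
    PySem.List.sorted (xs.map (·.1)) k true =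
      (PySem.List.sorted xs (fun kv => kv.2) true).map (·.1) := by
  rw [PySem.List.sorted_rev_eq_foldl_insertBy, PySem.List.sorted_rev_eq_foldl_insertBy]
  simpa using pvFoldl_insertBy_map k xs [] hxs (by simp)

-- A's grouping step is a plain modify
theorem pvStepA (d : PySem.Dict Int (List String)) (p : String × Int) :
    (if d.contains (PySem.Str.len p.1) then d else d.insert (PySem.Str.len p.1) []).modify
        (PySem.Str.len p.1) [] (fun l => l ++ [p.1]) =
      d.modify (PySem.Str.len p.1) [] (fun l => l ++ [p.1]) := by
  by_cases h : d.contains (PySem.Str.len p.1)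
  · rw [if_pos h]
  · rw [if_neg h]
    simp only [PySem.Dict.modify]
    rw [PySem.Dict.getD_insert_self, PySem.Dict.insert_insert_self,
      PySem.Dict.getD_of_not_contains d [] (by simpa using h)]

-- dictionary built by inserting [] keeps every value []
theorem pvBaseD (l : List (String × Int)) (d : PySem.Dict Int (List String))
    (h : ∀ c, d.getD c [] = []) (c : Int) :
    (l.foldl (fun d p => d.insert (PySem.Str.len p.1) []) d).getD c [] = [] := by
  induction l generalizing d with
  | nil => exact h c
  | cons p l ih =>
    simp only [List.foldl_cons]
    exact ih _ (fun c' => by rw [PySem.Dict.getD_insert]; split <;> simp [h])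

-- Set.update by elements already present is the identity
theorem pvSetUpdate_of_subset (xs s : PySem.Set Int) (h : ∀ x ∈ xs, x ∈ s) :
    PySem.Set.update s xs = s := by
  induction xs generalizing s with
  | nil => rfl
  | cons x xs ih =>
    simp only [PySem.Set.update, List.foldl_cons]
    rw [show PySem.Set.add s x = s from PySem.Set.add_of_mem (h x (by simp))]
    exact ih s (fun z hz => h z (by simp [hz]))

-- first-match lookup in a duplicate-free association list
theorem pvLookup (words : List (String × Int)) (hnd : (words.map (·.1)).Nodup)
    (p : String × Int) (hp : p ∈ words) : (PySem.Dict.mk words).getD p.1 0 = p.2 :=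
  PySem.Dict.getD_of_mem_items (PySem.Dict.mk words) hp (by simpa using hnd) 0

theorem pvMain (words : List (String × Int)) (hnd : (words.map (·.1)).Nodup) :
    create_word_database_by_length words = create_word_database_by_length_alt words := by
  show (words.foldl (fun d p =>
      (if d.contains (PySem.Str.len p.1) then d else d.insert (PySem.Str.len p.1) ([] : List String)).modify
        (PySem.Str.len p.1) [] (fun l => l ++ [p.1])) PySem.Dict.empty).items.map
      (fun q => (q.1, PySem.List.sorted q.2 (fun w => (PySem.Dict.mk words).getD w 0) true)) =
    ((PySem.List.sorted words (fun kv => kv.2) true).foldl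
      (fun d p => d.modify (PySem.Str.len p.1) [] (fun l => l ++ [p.1]))
      (words.foldl (fun d p => d.insert (PySem.Str.len p.1) ([] : List String)) PySem.Dict.empty)).items
  rw [PySem.List.foldl_congr_mem words
      (fun (d : PySem.Dict Int (List String)) (p : String × Int) =>
        (if d.contains (PySem.Str.len p.1) then d else d.insert (PySem.Str.len p.1) ([] : List String)).modify
          (PySem.Str.len p.1) [] (fun l => l ++ [p.1]))
      (fun d p => d.modify (PySem.Str.len p.1) [] (fun l => l ++ [p.1]))
      PySem.Dict.empty (fun acc x _ => pvStepA acc x)]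
  have nA := PySem.Dict.nodup_keys_foldl_modify_key words (fun p : String × Int => PySem.Str.len p.1)
    ([] : List String) (fun _ p => fun l => l ++ [p.1]) PySem.Dict.empty
    (by simp [PySem.Dict.keys_empty])
  have kA := PySem.Dict.keys_foldl_modify_key words (fun p : String × Int => PySem.Str.len p.1)
    ([] : List String) (fun _ p => fun l => l ++ [p.1]) PySem.Dict.empty
  have kBase := PySem.Dict.keys_foldl_insert_key words (fun p : String × Int => PySem.Str.len p.1)
    (fun _ _ => ([] : List String)) PySem.Dict.empty
  have nBase := PySem.Dict.nodup_keys_foldl_insert_key words (fun p : String × Int => PySem.Str.len p.1)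
    (fun _ _ => ([] : List String)) PySem.Dict.empty (by simp [PySem.Dict.keys_empty])
  have kB := PySem.Dict.keys_foldl_modify_key (PySem.List.sorted words (fun kv : String × Int => kv.2) true)
    (fun p : String × Int => PySem.Str.len p.1) ([] : List String)
    (fun _ p => fun l => l ++ [p.1])
    (words.foldl (fun d p => d.insert (PySem.Str.len p.1) ([] : List String)) PySem.Dict.empty)
  have hkeysB : ((PySem.List.sorted words (fun kv : String × Int => kv.2) true).foldl
      (fun d p => d.modify (PySem.Str.len p.1) [] (fun l => l ++ [p.1]))
      (words.foldl (fun d p => d.insert (PySem.Str.len p.1) ([] : List String)) PySem.Dict.empty)).keys =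
      (words.foldl (fun d p => d.insert (PySem.Str.len p.1) ([] : List String)) PySem.Dict.empty).keys := by
    rw [kB]
    apply pvSetUpdate_of_subset
    intro x hx
    rw [kBase, PySem.Dict.keys_empty]
    rcases List.mem_map.1 hx with ⟨p, hp, rfl⟩
    have hpw : p ∈ words := (PySem.List.mem_sorted _ _ _ _).1 hp
    exact (PySem.Set.mem_ofList _ _).2 (List.mem_map_of_mem hpw)
  have nB : (((PySem.List.sorted words (fun kv : String × Int => kv.2) true).foldl
      (fun d p => d.modify (PySem.Str.len p.1) [] (fun l => l ++ [p.1]))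
      (words.foldl (fun d p => d.insert (PySem.Str.len p.1) ([] : List String)) PySem.Dict.empty)).keys).Nodup := by
    rw [hkeysB]; exact nBase
  -- value of A's dictionary at any length
  have gA : ∀ c : Int, (words.foldl
      (fun d p => d.modify (PySem.Str.len p.1) [] (fun l => l ++ [p.1])) PySem.Dict.empty).getD c [] =
      (words.filter (fun p => PySem.Str.len p.1 == c)).map (·.1) := by
    intro c
    rw [show (words.foldl (fun d p => d.modify (PySem.Str.len p.1) [] (fun l => l ++ [p.1]))
        PySem.Dict.empty) = ((words.map (fun p => (PySem.Str.len p.1, p.1))).foldl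
        (fun d q => d.modify q.1 [] (fun l => l ++ [q.2])) PySem.Dict.empty) from
        (List.foldl_map (f := fun p : String × Int => (PySem.Str.len p.1, p.1))
          (g := fun (d : PySem.Dict Int (List String)) q => d.modify q.1 [] (fun l => l ++ [q.2]))).symm]
    rw [PySem.Dict.getD_foldl_modify_append, PySem.Dict.getD_empty, List.filter_map, List.map_map]
    simp [Function.comp_def]
  -- value of B's dictionary at any length
  have hbase : ∀ c : Int, (words.foldl
      (fun d p => d.insert (PySem.Str.len p.1) ([] : List String)) PySem.Dict.empty).getD c ([] : List String) = [] :=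
    pvBaseD words PySem.Dict.empty (fun c => PySem.Dict.getD_empty c [])
  have gB : ∀ c : Int, (((PySem.List.sorted words (fun kv : String × Int => kv.2) true).foldl
      (fun d p => d.modify (PySem.Str.len p.1) [] (fun l => l ++ [p.1]))
      (words.foldl (fun d p => d.insert (PySem.Str.len p.1) ([] : List String)) PySem.Dict.empty))).getD c [] =
      ((PySem.List.sorted words (fun kv : String × Int => kv.2) true).filter
        (fun p => PySem.Str.len p.1 == c)).map (·.1) := by
    intro c
    rw [show ((PySem.List.sorted words (fun kv : String × Int => kv.2) true).foldl
        (fun d p => d.modify (PySem.Str.len p.1) [] (fun l => l ++ [p.1]))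
        (words.foldl (fun d p => d.insert (PySem.Str.len p.1) ([] : List String)) PySem.Dict.empty)) =
        (((PySem.List.sorted words (fun kv : String × Int => kv.2) true).map
          (fun p => (PySem.Str.len p.1, p.1))).foldl
        (fun d q => d.modify q.1 [] (fun l => l ++ [q.2]))
        (words.foldl (fun d p => d.insert (PySem.Str.len p.1) ([] : List String)) PySem.Dict.empty)) from
        (List.foldl_map (f := fun p : String × Int => (PySem.Str.len p.1, p.1))
          (g := fun (d : PySem.Dict Int (List String)) q => d.modify q.1 [] (fun l => l ++ [q.2]))).symm]
    rw [PySem.Dict.getD_foldl_modify_append, hbase, List.filter_map, List.map_map]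
    simp [Function.comp_def]
  -- items of both dictionaries
  rw [PySem.Dict.items_eq_map_keys _ nA ([] : List String),
    PySem.Dict.items_eq_map_keys _ nB ([] : List String), hkeysB, kA, kBase, List.map_map]
  apply List.map_congr_left
  intro c _
  simp only [Function.comp_def]
  rw [gA c, gB c, pvFilter_sorted, pvSorted_map_key (fun w => (PySem.Dict.mk words).getD w 0)
    (words.filter (fun p => PySem.Str.len p.1 == c))
    (fun q hq => pvLookup words hnd q (List.mem_of_mem_filter hq))]

-- ===== VERDICT (by name: the statement is the Claim_ definition above) =====
theorem create_word_database_by_length_spec : Claim_equal_create_word_database_by_length := by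
  intro words _ hpre
  show create_word_database_by_length words = create_word_database_by_length_alt words
  exact pvMain words hpre
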